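-- pv_equiv track=rewrite | github.com/baeseongsu/ehrxqa | tests/test_utils.py | map_index
-- ===== SOURCE A (Python) =====
-- def map_index(idx, detailed=True):
--
--     if isinstance(idx, str):
--         idx = int(idx)
--
--     modality_map = {
--         range(0, 6): ("TABLE", "NONE"),  # 0-5
--         range(6, 122): ("TABLE", "SINGLE"),  # 6-121
--         range(122, 183): ("TABLE", "GROUP"),  # 122-182
--         range(1000, 2000): ("IMAGE", "SINGLE-1"),
--         range(2000, 3000): ("IMAGE", "SINGLE-2"),
--         range(3000, 4000): ("IMAGE", "SINGLE-N"),
--         range(4000, 5000): ("IMAGE", "GROUP-N"),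
--         range(5000, 6000): ("MULTIMODAL", "SINGLE"),
--         range(6000, 7000): ("MULTIMODAL", "GROUP"),
--     }
--
--     for index_range, (modality, patient_scope) in modality_map.items():
--         if idx in index_range:
--             if not detailed:
--                 modality = modality.split("-")[0]
--             return f"{modality}-{patient_scope}"
--     return "Invalid index"
-- ===== SOURCE B (Python) =====
-- def map_index(idx, detailed=True):
--     # B: arithmetic block dispatch instead of scanning nine ranges.
--     # `detailed` never affects the output: no modality string contains "-",
--     # so A's split("-")[0] is the identity.
--     if isinstance(idx, str):
--         idx = int(idx)
--     block = idx // 1000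
--     if block == 0:
--         if 0 <= idx <= 5:
--             return "TABLE-NONE"
--         if idx <= 121:
--             return "TABLE-SINGLE"
--         if idx <= 182:
--             return "TABLE-GROUP"
--         return "Invalid index"
--     table = {
--         1: "IMAGE-SINGLE-1",
--         2: "IMAGE-SINGLE-2",
--         3: "IMAGE-SINGLE-N",
--         4: "IMAGE-GROUP-N",
--         5: "MULTIMODAL-SINGLE",
--         6: "MULTIMODAL-GROUP",
--     }
--     return table.get(block, "Invalid index")
-- ===== Notes on version B (the rewrite author's own statement) =====
-- stated objective: simpler
-- what changed: Replaces the linear scan over nine range objects (and the dead split('-') branch) by computing the thousands block idx//1000 once and dispatching: a three-way comparison chain for block 0 and a single dict lookup for blocks 1-6.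
import Mathlib
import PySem

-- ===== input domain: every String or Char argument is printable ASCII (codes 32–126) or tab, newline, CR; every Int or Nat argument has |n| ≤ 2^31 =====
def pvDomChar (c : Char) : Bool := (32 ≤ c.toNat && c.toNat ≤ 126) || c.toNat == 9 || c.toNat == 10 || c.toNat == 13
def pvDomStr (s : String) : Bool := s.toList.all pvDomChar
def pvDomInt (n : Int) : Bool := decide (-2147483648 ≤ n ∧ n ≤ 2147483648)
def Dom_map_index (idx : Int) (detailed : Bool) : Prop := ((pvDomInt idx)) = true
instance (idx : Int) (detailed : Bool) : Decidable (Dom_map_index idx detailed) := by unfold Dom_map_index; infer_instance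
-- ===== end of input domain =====

-- B replaces A's scan over nine ranges by an idx // 1000 block dispatch (objective: simpler).

-- ===== PORT A =====
-- the dict literal of A: (range lo..hi, (modality, patient_scope)) in insertion order
def mapIndexRanges : List ((Int × Int) × (String × String)) :=
  [ ((0, 6), ("TABLE", "NONE")),
    ((6, 122), ("TABLE", "SINGLE")),
    ((122, 183), ("TABLE", "GROUP")),
    ((1000, 2000), ("IMAGE", "SINGLE-1")),
    ((2000, 3000), ("IMAGE", "SINGLE-2")),
    ((3000, 4000), ("IMAGE", "SINGLE-N")),
    ((4000, 5000), ("IMAGE", "GROUP-N")),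
    ((5000, 6000), ("MULTIMODAL", "SINGLE")),
    ((6000, 7000), ("MULTIMODAL", "GROUP")) ]

-- the for-loop with early return; modality.split("-")[0]: split? never returns none
-- for sep "-" and its result is nonempty, so the getD/headD defaults are unreachable
def mapIndexLoop (idx : Int) (detailed : Bool) :
    List ((Int × Int) × (String × String)) → String
  | [] => "Invalid index"
  | ((lo, hi), (modality, scope)) :: rest =>
    if lo ≤ idx ∧ idx < hi then
      let m := if detailed then modality
               else (((PySem.Str.split? modality "-").getD []).headD "")
      m ++ "-" ++ scope
    else mapIndexLoop idx detailed rest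

def map_index (idx : Int) (detailed : Bool) : String :=
  mapIndexLoop idx detailed mapIndexRanges

-- ===== PORT B =====
def mapIndexTable : PySem.Dict Int String :=
  PySem.Dict.ofList
    [ (1, "IMAGE-SINGLE-1"),
      (2, "IMAGE-SINGLE-2"),
      (3, "IMAGE-SINGLE-N"),
      (4, "IMAGE-GROUP-N"),
      (5, "MULTIMODAL-SINGLE"),
      (6, "MULTIMODAL-GROUP") ]

def map_index_alt (idx : Int) (detailed : Bool) : String :=
  let block := PySem.Int.floordiv idx 1000
  if block = 0 then
    if 0 ≤ idx ∧ idx ≤ 5 then "TABLE-NONE"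
    else if idx ≤ 121 then "TABLE-SINGLE"
    else if idx ≤ 182 then "TABLE-GROUP"
    else "Invalid index"
  else
    PySem.Dict.getD mapIndexTable block "Invalid index"

-- ===== PRECONDITION & SPEC =====
def Spec_map_index (idx : Int) (detailed : Bool) (out : String) : Prop := out = map_index_alt idx detailed
instance (idx : Int) (detailed : Bool) (out : String) : Decidable (Spec_map_index idx detailed out) := by unfold Spec_map_index; infer_instance

-- ===== CLAIM (what is proved, stated in full; the proofs are below) =====
def Claim_equal_map_index : Prop := ∀ (idx : Int) (detailed : Bool), Dom_map_index idx detailed → Spec_map_index idx detailed (map_index idx detailed)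

-- ===== LEMMAS AND PROOFS =====

-- ===== VERDICT (by name: the statement is the Claim_ definition above) =====
set_option maxHeartbeats 1000000 in
theorem mapIndexLoop_detailed (idx : Int) (l : List ((Int × Int) × (String × String)))
    (h : ∀ p ∈ l, (((PySem.Str.split? p.2.1 "-").getD []).headD "") = p.2.1) :
    mapIndexLoop idx false l = mapIndexLoop idx true l := by
  induction l with
  | nil => rfl
  | cons p rest ih =>
    obtain ⟨⟨lo, hi⟩, m, sc⟩ := p
    have hm := h _ (List.mem_cons_self)
    simp only at hm
    simp only [mapIndexLoop, hm, Bool.false_eq_true, ite_true, ite_false]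
    split_ifs with hc
    · rfl
    · exact ih (fun q hq => h q (List.mem_cons_of_mem _ hq))

set_option maxHeartbeats 2000000 in
theorem map_index_true (idx : Int) : map_index idx true = map_index_alt idx true := by
  unfold map_index map_index_alt
  have hf : PySem.Int.floordiv idx 1000 = idx / 1000 :=
    PySem.Int.floordiv_eq_ediv_of_pos (by norm_num)
  have htab : mapIndexTable = PySem.Dict.mk
      [ (1, "IMAGE-SINGLE-1"), (2, "IMAGE-SINGLE-2"), (3, "IMAGE-SINGLE-N"),
        (4, "IMAGE-GROUP-N"), (5, "MULTIMODAL-SINGLE"), (6, "MULTIMODAL-GROUP") ] := rfl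
  simp only [mapIndexLoop, mapIndexRanges, hf, htab,
      PySem.Dict.getD, PySem.Dict.get?_mk_cons, beq_iff_eq]
  split_ifs <;> first | omega | rfl

-- ===== VERDICT (by name: the statement is the Claim_ definition above) =====
theorem map_index_spec : Claim_equal_map_index := by
  intro idx detailed _
  unfold Spec_map_index
  have hb : map_index_alt idx detailed = map_index_alt idx true := rfl
  cases detailed
  · rw [hb, ← map_index_true]
    exact mapIndexLoop_detailed idx mapIndexRanges (by decide)
  · exact map_index_true idx
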